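-- pv_equiv track=rewrite | github.com/lucasgpmoreira/testeGrafos | testeCoberturaGrafos-geeksforgeeks.py | isCover
-- ===== SOURCE A (Python) =====
-- def isCover(V, k, E, gr, vertex_cover):
--     Set = (1 << k) - 1
--     limit = (1 << V)
--     vis = [[0] * maxn for _ in range(maxn)]
--
--     while Set < limit:
--         vis = [[0] * maxn for _ in range(maxn)]
--         cnt = 0
--         j = 1
--         v = 1
--
--         while j < limit:
--             if Set & j:
--                 for i in range(1, V + 1):
--                     if gr[v][i] and not vis[v][i]:
--                         vis[v][i] = 1
--                         vis[i][v] = 1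
--                         cnt += 1
--             j = j << 1
--             v += 1
--
--         if cnt == E:
--             vertex_cover.clear()
--             j = 1
--             v = 1
--             while j < limit:
--                 if Set & j:
--                     vertex_cover.append(v)
--                 j = j << 1
--                 v += 1
--             return True
--
--         c = Set & -Set
--         r = Set + c
--         Set = (((r ^ Set) >> 2) // c) | r
--     return False
--
-- maxn = 25
-- ===== SOURCE B (Python) =====
-- def isCover(V, k, E, gr, vertex_cover):
--     # Enumerate the k-subsets of {1..V} directly in colex order by recursion
--     # on the largest chosen vertex (the same order Gosper's hack visits),
--     # and test each candidate by collecting its distinct covered edges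
--     # (normalized pairs) in a set.
--     def covers(sel):
--         covered = set()
--         for v in sel:
--             for i in range(1, V + 1):
--                 if gr[v][i]:
--                     covered.add((min(v, i), max(v, i)))
--         return len(covered) == E
--
--     def colex(n, r):
--         # r-subsets of {1..n} as ascending lists, in colex order
--         if r == 0:
--             yield []
--             return
--         for top in range(r, n + 1):
--             for rest in colex(top - 1, r - 1):
--                 yield rest + [top]
--
--     for sel in colex(V, k):
--         if covers(sel):
--             vertex_cover.clear()
--             vertex_cover.extend(sel)
--             return True
--     return False
-- ===== Notes on version B (the rewrite author's own statement) =====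
-- stated objective: alternative
-- what changed: Replaces Gosper's-hack bit-trick mask enumeration and the fixed 25x25 visited-matrix edge counting by a recursive colex generator of k-subsets and a set of normalized edge pairs; same visiting order, so return value and vertex_cover mutation are identical.
-- outside the precondition, e.g. on isCover(2, 1, 1, [[], [0, 0, 1]], []): A returns True, B returns True
import Mathlib
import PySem

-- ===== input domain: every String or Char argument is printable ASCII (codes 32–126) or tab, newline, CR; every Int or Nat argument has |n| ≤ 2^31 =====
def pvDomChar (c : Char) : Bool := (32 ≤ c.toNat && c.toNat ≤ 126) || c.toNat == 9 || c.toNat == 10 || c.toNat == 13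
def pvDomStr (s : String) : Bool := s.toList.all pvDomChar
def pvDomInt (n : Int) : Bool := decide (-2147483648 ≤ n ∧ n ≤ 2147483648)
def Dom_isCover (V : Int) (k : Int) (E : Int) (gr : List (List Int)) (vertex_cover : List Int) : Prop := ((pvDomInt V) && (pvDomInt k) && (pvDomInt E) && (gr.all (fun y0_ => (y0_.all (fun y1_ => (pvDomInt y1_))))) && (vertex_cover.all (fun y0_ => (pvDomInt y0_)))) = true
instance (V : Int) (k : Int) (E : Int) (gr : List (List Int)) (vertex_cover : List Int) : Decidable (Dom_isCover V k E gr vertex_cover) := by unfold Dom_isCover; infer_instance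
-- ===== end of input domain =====

-- B replaces Gosper's-hack subset enumeration by a recursive colex generator of k-subsets and the
-- fixed visited-matrix edge counting by a set of normalized pairs; equivalence is about the Bool
-- RETURN value only (both Pythons mutate vertex_cover identically on success, a side effect not
-- modelled here).


-- ===== PORT A =====
-- m[v][i] for a matrix/adjacency row list, used for gr (both ports) and vis (port A)
-- (indices are ≥ 1 here, so no negative-index wraparound; in range under Pre_)
def pvAt2 (m : List (List Int)) (v i : Int) : Int :=
  PySem.List.pyGetD (PySem.List.pyGetD m v []) i 0

-- vis[v][i] = 1 (in range under Pre_: vis is only touched where gr[v][i] ≠ 0, which forces v,i ≤ 24)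
def pvA_visSet (vis : List (List Int)) (v i : Int) : List (List Int) :=
  PySem.List.pySetD vis v (PySem.List.pySetD (PySem.List.pyGetD vis v []) i 1)

-- 'for i in range(1, V + 1): if gr[v][i] and not vis[v][i]: …'
def pvA_innerFor (V : Int) (gr : List (List Int)) (v : Int) (st : List (List Int) × Int) : List (List Int) × Int :=
  (PySem.List.pyRange 1 (V + 1) 1).foldl
    (fun st i =>
      if pvAt2 gr v i ≠ 0 ∧ pvAt2 st.1 v i = 0 then
        (pvA_visSet (pvA_visSet st.1 v i) i v, st.2 + 1)
      else st)
    st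

-- the inner 'while j < limit' over doubling j = 1, 2, 4, … visits exactly v = 1, …, V
-- (limit = 2 ** V): ported as a fold over range(1, V+1) carrying j in the state
def pvA_countCovered (V : Int) (gr : List (List Int)) (Set : Int) : Int :=
  ((PySem.List.pyRange 1 (V + 1) 1).foldl
    (fun (st : Int × (List (List Int) × Int)) v =>
      if PySem.Int.band Set st.1 ≠ 0 then
        (st.1 <<< 1, pvA_innerFor V gr v st.2)
      else
        (st.1 <<< 1, st.2))
    (1, (List.replicate 25 (List.replicate 25 0), 0))).2.2

-- 'while Set < limit' with Gosper's-hack successor; fuel = limit + 1 is enough because Set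
-- strictly increases on every iteration taken under Pre_ (Set > 0 there)
def pvA_gosper (V : Int) (E : Int) (gr : List (List Int)) (limit : Int) : Nat → Int → Bool
  | 0, _ => false
  | fuel + 1, Set =>
    if Set < limit then
      if pvA_countCovered V gr Set = E then true
      else
        let c := PySem.Int.band Set (-Set)
        let r := Set + c
        pvA_gosper V E gr limit fuel (PySem.Int.bor (PySem.Int.floordiv ((PySem.Int.bxor r Set) >>> 2) c) r)
    else false

-- '.toNat' on the shift amounts: Python raises on a negative shift, excluded by Pre_.
-- The second 'while j < limit' only rebuilds vertex_cover (a side effect), it does not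
-- affect the returned Bool and is not modelled.
def isCover (V : Int) (k : Int) (E : Int) (gr : List (List Int)) (vertex_cover : List Int) : Bool :=
  pvA_gosper V E gr ((1 : Int) <<< V.toNat) (((1 : Int) <<< V.toNat).toNat + 1) (((1 : Int) <<< k.toNat) - 1)

-- ===== PORT B =====
-- 'covered = set(); for v in sel: for i in range(1, V+1): if gr[v][i]: covered.add((min,max))'
def pvB_covered (V : Int) (gr : List (List Int)) (sel : List Int) : PySem.Set (Int × Int) :=
  sel.foldl
    (fun cov v =>
      (PySem.List.pyRange 1 (V + 1) 1).foldl
        (fun cov i => if pvAt2 gr v i ≠ 0 then PySem.Set.add cov (min v i, max v i) else cov)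
        cov)
    PySem.Set.empty

-- 'def colex(n, r): ...' — the r-subsets of {1..n} as ascending lists, in colex order;
-- the generator becomes the list of all yielded subsets (the early 'return True' becomes 'any').
-- The recursion argument r is a Nat ('.toNat' at the call site: Python B recurses forever on k < 0,
-- which Pre_ excludes since A raises there too).
def pvColexN (n : Int) (r : Nat) : List (List Int) :=
  match r with
  | 0 => [[]]
  | r' + 1 =>
    (PySem.List.pyRange ((r' : Int) + 1) (n + 1) 1).flatMap
      (fun top => (pvColexN (top - 1) r').map (fun rest => rest ++ [top]))
termination_by r

-- 'for sel in colex(V, k): if covers(sel): …; return True / return False' — covers(sel) inlined;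
-- the vertex_cover mutation on success is a side effect, not part of the returned Bool
def isCover_alt (V : Int) (k : Int) (E : Int) (gr : List (List Int)) (vertex_cover : List Int) : Bool :=
  (pvColexN V k.toNat).any (fun sel => decide (PySem.Set.len (pvB_covered V gr sel) = E))

-- ===== PRECONDITION & SPEC =====
-- Pre_ excludes exactly the inputs where the Python A raises: negative V or k (bad shift),
-- k = 0 with E ≠ 0 (Gosper's step divides by zero), and — only when the search loop body runs,
-- i.e. 1 ≤ k ≤ V — an adjacency row 1..V missing or shorter than V+1 (IndexError on gr) or a
-- nonzero entry gr[v][i] (1 ≤ v,i ≤ V) with v > 24 or i > 24 (IndexError on the fixed 25×25 vis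
-- matrix).  On a few such inputs A happens to return early before the bad access would be reached
-- (see the cites); B agrees with A on those cited inputs too.
def Pre_isCover (V : Int) (k : Int) (E : Int) (gr : List (List Int)) (vertex_cover : List Int) : Prop :=
  0 ≤ V ∧ 0 ≤ k ∧ (k = 0 → E = 0) ∧
  (1 ≤ k → k ≤ V →
    V.toNat + 1 ≤ gr.length ∧ (∀ row ∈ (gr.drop 1).take V.toNat, V.toNat + 1 ≤ row.length) ∧
    (∀ row ∈ (gr.drop 25).take (V.toNat - 24), ∀ x ∈ (row.drop 1).take V.toNat, x = 0) ∧
    (∀ row ∈ (gr.drop 1).take (min V.toNat 24), ∀ x ∈ (row.drop 25).take (V.toNat - 24), x = 0))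
instance (V : Int) (k : Int) (E : Int) (gr : List (List Int)) (vertex_cover : List Int) : Decidable (Pre_isCover V k E gr vertex_cover) := by unfold Pre_isCover; infer_instance

def pvWitness_isCover : Int × Int × Int × List (List Int) × List Int :=
  (3, 2, 2, [[0, 0, 0, 0], [0, 0, 1, 1], [0, 1, 0, 0], [0, 1, 0, 0]], [])

def Spec_isCover (V : Int) (k : Int) (E : Int) (gr : List (List Int)) (vertex_cover : List Int) (out : Bool) : Prop := out = isCover_alt V k E gr vertex_cover
instance (V : Int) (k : Int) (E : Int) (gr : List (List Int)) (vertex_cover : List Int) (out : Bool) : Decidable (Spec_isCover V k E gr vertex_cover out) := by unfold Spec_isCover; infer_instance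

-- ===== CLAIM (what is proved, stated in full; the proofs are below) =====
def Claim_equal_isCover : Prop := ∀ (V : Int) (k : Int) (E : Int) (gr : List (List Int)) (vertex_cover : List Int), Dom_isCover V k E gr vertex_cover → Pre_isCover V k E gr vertex_cover → Spec_isCover V k E gr vertex_cover (isCover V k E gr vertex_cover)

-- ===== LEMMAS AND PROOFS =====

def pcN (n : Nat) : Nat :=
  if n = 0 then 0 else n % 2 + pcN (n / 2)
decreasing_by exact Nat.div_lt_self (Nat.pos_of_ne_zero (by assumption)) one_lt_two

theorem pcN_zero : pcN 0 = 0 := by rw [pcN]; rfl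

theorem pcN_pos_eq (n : Nat) (h : n ≠ 0) : pcN n = n % 2 + pcN (n / 2) := by
  rw [pcN]; simp [h]

theorem pcN_one : pcN 1 = 1 := by rw [pcN]; norm_num [pcN_zero]

theorem pcN_halve (n : Nat) : n % 2 + pcN (n / 2) = pcN n := by
  rcases eq_or_ne n 0 with rfl | h
  · simp [pcN_zero]
  · exact (pcN_pos_eq n h).symm

theorem pcN_split (n a b : Nat) (hb : b < 2 ^ n) : pcN (2 ^ n * a + b) = pcN a + pcN b := by
  induction n generalizing b with
  | zero =>
    interval_cases b
    simp [pcN_zero]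
  | succ n ih =>
    have h2 : 2 ^ (n + 1) = 2 * 2 ^ n := by ring
    rcases eq_or_ne (2 ^ (n + 1) * a + b) 0 with h0 | h0
    · have hb0 : b = 0 := by omega
      have ha0 : 2 ^ (n + 1) * a = 0 := by omega
      have hp : 0 < 2 ^ (n + 1) := Nat.two_pow_pos _
      have : a = 0 := by
        rcases Nat.mul_eq_zero.mp ha0 with h | h
        · omega
        · exact h
      subst this; subst hb0; simp [pcN_zero]
    · rw [pcN_pos_eq _ h0]
      have hmul : 2 ^ (n + 1) * a = 2 * (2 ^ n * a) := by ring
      have hmod : (2 ^ (n + 1) * a + b) % 2 = b % 2 := by omega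
      have hdiv : (2 ^ (n + 1) * a + b) / 2 = 2 ^ n * a + b / 2 := by omega
      rw [hmod, hdiv, ih (b / 2) (by omega)]
      have := pcN_halve b
      omega

theorem pcN_two_pow_sub_one (z : Nat) : pcN (2 ^ z - 1) = z := by
  induction z with
  | zero => simpa using pcN_zero
  | succ z ih =>
    have h2 : 2 ^ (z + 1) = 2 * 2 ^ z := by ring
    have h1 : 1 ≤ 2 ^ z := Nat.one_le_two_pow
    have hne : 2 ^ (z + 1) - 1 ≠ 0 := by omega
    rw [pcN_pos_eq _ hne]
    have hm : (2 ^ (z + 1) - 1) % 2 = 1 := by omega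
    have hd : (2 ^ (z + 1) - 1) / 2 = 2 ^ z - 1 := by omega
    rw [hm, hd, ih]; omega

theorem pcN_eq_zero_iff (u : Nat) : pcN u = 0 ↔ u = 0 := by
  constructor
  · induction u using Nat.strong_induction_on with
    | _ u ih =>
      intro h
      by_contra hu
      rw [pcN_pos_eq u hu] at h
      have h1 := ih (u / 2) (Nat.div_lt_self (Nat.pos_of_ne_zero hu) one_lt_two) (by omega)
      omega
  · rintro rfl; exact pcN_zero

theorem pcN_le_width (n : Nat) : ∀ u, u < 2 ^ n → pcN u ≤ n := by
  induction n with
  | zero => intro u hu; interval_cases u; simp [pcN_zero]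
  | succ n ih =>
    intro u hu
    rcases eq_or_ne u 0 with rfl | h
    · simp [pcN_zero]
    · have h2 : 2 ^ (n + 1) = 2 * 2 ^ n := by ring
      rw [pcN_pos_eq u h]
      have := ih (u / 2) (by omega)
      omega

theorem pcN_eq_width (n : Nat) : ∀ u, u < 2 ^ n → pcN u = n → u = 2 ^ n - 1 := by
  induction n with
  | zero => intro u hu _; omega
  | succ n ih =>
    intro u hu hpc
    have h2 : 2 ^ (n + 1) = 2 * 2 ^ n := by ring
    have h1 : 1 ≤ 2 ^ n := Nat.one_le_two_pow
    have hne : u ≠ 0 := by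
      rintro rfl; rw [pcN_zero] at hpc; omega
    rw [pcN_pos_eq u hne] at hpc
    have hle := pcN_le_width n (u / 2) (by omega)
    have hm : u % 2 = 1 := by omega
    have := ih (u / 2) (by omega) (by omega)
    omega

theorem pcN_lt_of_lt_pred (w u : Nat) (h : u < 2 ^ w - 1) : pcN u < w := by
  have h0 : 1 ≤ 2 ^ w := Nat.one_le_two_pow
  have h1 : u < 2 ^ w := by omega
  have h2 := pcN_le_width w u h1
  rcases Nat.lt_or_ge (pcN u) w with hlt | hge
  · exact hlt
  · have := pcN_eq_width w u h1 (by omega)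
    omega

theorem pcN_max_val (z : Nat) : ∀ d u, u < 2 ^ (d + z) → pcN u ≤ z → u ≤ 2 ^ (d + z) - 2 ^ d := by
  induction z with
  | zero =>
    intro d u hu hpc
    have : u = 0 := (pcN_eq_zero_iff u).mp (Nat.le_zero.mp hpc)
    omega
  | succ z ih =>
    intro d u hu hpc
    have hsplit : 2 ^ (d + (z + 1)) = 2 * 2 ^ (d + z) := by ring
    have h1 : 2 ^ d ≤ 2 ^ (d + z) := Nat.pow_le_pow_right (by norm_num) (by omega)
    rcases Nat.lt_or_ge u (2 ^ (d + z)) with h | h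
    · omega
    · have hlt : u - 2 ^ (d + z) < 2 ^ (d + z) := by omega
      have hsp : u = 2 ^ (d + z) * 1 + (u - 2 ^ (d + z)) := by omega
      have hpc2 : pcN u = 1 + pcN (u - 2 ^ (d + z)) := by
        have h' := pcN_split (d + z) 1 (u - 2 ^ (d + z)) hlt
        rw [← hsp] at h'
        rw [h', pcN_one]
      have hx := ih d (u - 2 ^ (d + z)) hlt (by omega)
      omega

theorem pvBandHigh (n a b c : Nat) (hb : b < 2 ^ n) (hc : c < 2 ^ n) :
    (2 ^ n * a + b) &&& (2 ^ n * a + c) = 2 ^ n * a + (b &&& c) := by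
  apply Nat.eq_of_testBit_eq; intro j
  rw [Nat.testBit_land, Nat.testBit_two_pow_mul_add a hb j, Nat.testBit_two_pow_mul_add a hc j,
    Nat.testBit_two_pow_mul_add a (lt_of_le_of_lt Nat.and_le_left hb) j]
  by_cases hj : j < n <;> simp [hj]

theorem pvXorHigh (n a b c : Nat) (hb : b < 2 ^ n) (hc : c < 2 ^ n) :
    (2 ^ n * a + b) ^^^ (2 ^ n * a + c) = b ^^^ c := by
  apply Nat.eq_of_testBit_eq; intro j
  rw [Nat.testBit_xor, Nat.testBit_two_pow_mul_add a hb j, Nat.testBit_two_pow_mul_add a hc j]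
  by_cases hj : j < n
  · simp [hj, Nat.testBit_xor]
  · have hxl : b ^^^ c < 2 ^ j :=
      lt_of_lt_of_le (Nat.xor_lt_two_pow hb hc) (Nat.pow_le_pow_right (by norm_num) (Nat.le_of_not_lt hj))
    simp [hj, Nat.testBit_lt_two_pow hxl]

theorem pvLorDisjoint (n a b : Nat) (hb : b < 2 ^ n) : b ||| 2 ^ n * a = 2 ^ n * a + b := by
  apply Nat.eq_of_testBit_eq; intro j
  have h0 : (0 : Nat) < 2 ^ n := Nat.two_pow_pos n
  rw [Nat.testBit_lor, Nat.testBit_two_pow_mul_add a hb j]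
  have e : 2 ^ n * a = 2 ^ n * a + 0 := by omega
  rw [e, Nat.testBit_two_pow_mul_add a h0 j]
  by_cases hj : j < n
  · simp [hj]
  · have : b < 2 ^ j := lt_of_lt_of_le hb (Nat.pow_le_pow_right (by norm_num) (Nat.le_of_not_lt hj))
    simp [hj, Nat.testBit_lt_two_pow this]

theorem pvXorTwoPow (m x : Nat) (hx : x < 2 ^ m) : 2 ^ m ^^^ x = 2 ^ m + x := by
  apply Nat.eq_of_testBit_eq; intro j
  have e : 2 ^ m + x = 2 ^ m * 1 + x := by omega
  rw [Nat.testBit_xor, Nat.testBit_two_pow, e, Nat.testBit_two_pow_mul_add 1 hx j]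
  by_cases hj : j < m
  · have : m ≠ j := by omega
    simp [hj, this]
  · by_cases hje : j = m
    · subst hje
      simp [Nat.testBit_lt_two_pow hx]
    · have hxj : x < 2 ^ j := lt_of_lt_of_le hx (Nat.pow_le_pow_right (by norm_num) (Nat.le_of_not_lt hj))
      have hmj : m ≠ j := by omega
      have h1 : (1 : Nat) < 2 ^ (j - m) := Nat.one_lt_two_pow (by omega)
      simp [hj, hmj, Nat.testBit_lt_two_pow hxj, Nat.testBit_lt_two_pow h1]

theorem pvBandBlockPred (t w : Nat) :
    ((2 ^ (w + 1) - 1) * 2 ^ t) &&& ((2 ^ (w + 1) - 1) * 2 ^ t - 1) =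
      (2 ^ (w + 1) - 1) * 2 ^ t - 2 ^ t := by
  have hpt : (1 : Nat) ≤ 2 ^ t := Nat.one_le_two_pow
  have hq : 2 ^ (t + 1) = 2 * 2 ^ t := by ring
  have hX : 2 ^ (t + 1) ≤ 2 ^ (t + w + 1) := Nat.pow_le_pow_right (by norm_num) (by omega)
  have A1 : (2 ^ (w + 1) - 1) * 2 ^ t = 2 ^ (t + w + 1) - 2 ^ t := by
    rw [Nat.sub_mul, one_mul]
    congr 1
    ring
  have A2 : 2 ^ (t + 1) * (2 ^ w - 1) = 2 ^ (t + w + 1) - 2 ^ (t + 1) := by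
    rw [Nat.mul_sub, mul_one]
    congr 1
    ring
  have e1 : (2 ^ (w + 1) - 1) * 2 ^ t = 2 ^ t * (2 ^ (w + 1) - 1) + 0 := by ring
  have e2 : (2 ^ (w + 1) - 1) * 2 ^ t - 1 = 2 ^ (t + 1) * (2 ^ w - 1) + (2 ^ t - 1) := by
    omega
  have e3 : (2 ^ (w + 1) - 1) * 2 ^ t - 2 ^ t = 2 ^ (t + 1) * (2 ^ w - 1) + 0 := by
    omega
  apply Nat.eq_of_testBit_eq; intro j
  rw [Nat.testBit_land, e2, e3, e1,
    Nat.testBit_two_pow_mul_add _ (Nat.two_pow_pos t) j,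
    Nat.testBit_two_pow_mul_add _ (by omega : 2 ^ t - 1 < 2 ^ (t + 1)) j,
    Nat.testBit_two_pow_mul_add _ (Nat.two_pow_pos (t + 1)) j,
    Nat.testBit_two_pow_sub_one, Nat.testBit_two_pow_sub_one, Nat.testBit_two_pow_sub_one]
  rcases Nat.lt_trichotomy j t with hj | hj | hj
  · simp [hj, (by omega : j < t + 1)]
  · subst hj
    simp [(by omega : ¬ j < j), (by omega : j < j + 1)]
  · have h1 : ¬ j < t := by omega
    have h2 : ¬ j < t + 1 := by omega
    simp only [if_neg h1, if_neg h2, Nat.zero_testBit, Bool.and_false, Bool.and_true]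
    by_cases hd : j - (t + 1) < w
    · simp [hd, (by omega : j - t < w + 1)]
    · simp [hd, (by omega : ¬ (j - t < w + 1))]

theorem pvDecomp (s : Nat) (hs : 0 < s) :
    ∃ a t z' : Nat, s = 2 ^ (t + z' + 2) * a + (2 ^ (z' + 1) - 1) * 2 ^ t := by
  induction s using Nat.strong_induction_on with
  | _ s ih =>
    rcases Nat.even_or_odd s with he | ho
    · have hm : s % 2 = 0 := Nat.even_iff.mp he
      obtain ⟨a, t, z', h⟩ := ih (s / 2) (by omega) (by omega)
      refine ⟨a, t + 1, z', ?_⟩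
      have hsd : s = 2 * (s / 2) := by omega
      rw [hsd, h]
      ring
    · have hm : s % 2 = 1 := Nat.odd_iff.mp ho
      rcases eq_or_ne (s % 4) 1 with h4 | h4
      · refine ⟨s / 4, 0, 0, ?_⟩
        norm_num
        omega
      · have h34 : s % 4 = 3 := by omega
        obtain ⟨a, t, z', h⟩ := ih (s / 2) (by omega) (by omega)
        have hodd : s / 2 % 2 = 1 := by omega
        have ht : t = 0 := by
          cases t with
          | zero => rfl
          | succ t'' =>
            exfalso
            have : s / 2 = 2 * (2 ^ (t'' + z' + 2) * a + (2 ^ (z' + 1) - 1) * 2 ^ t'') := by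
              rw [h]; ring
            omega
        subst ht
        refine ⟨a, 0, z' + 1, ?_⟩
        have h2 : s = 2 * (s / 2) + 1 := by omega
        have m1 : 2 ^ (0 + (z' + 1) + 2) * a = 2 * (2 ^ (0 + z' + 2) * a) := by ring
        have m2 : 2 ^ (z' + 2) = 2 * 2 ^ (z' + 1) := by ring
        have hp : 1 ≤ 2 ^ (z' + 1) := Nat.one_le_two_pow
        have hb : (2 ^ (z' + 1) - 1) * 2 ^ 0 = 2 ^ (z' + 1) - 1 := by ring
        have hb2 : (2 ^ ((z' + 1) + 1) - 1) * 2 ^ 0 = 2 ^ (z' + 2) - 1 := by ring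
        rw [h2, h, hb, hb2, m1]
        omega

theorem pvBandNegSelf (s : Nat) (hs : 0 < s) :
    PySem.Int.band (s : Int) (-(s : Int)) = ((s - (s &&& (s - 1)) : Nat) : Int) := by
  unfold PySem.Int.band
  have h1 : (0 : Int) ≤ (s : Int) := by positivity
  have h2 : ¬ (0 : Int) ≤ -(s : Int) := by
    simp only [not_le]
    exact_mod_cast Int.neg_neg_of_pos (by exact_mod_cast hs)
  simp only [if_pos h1, if_neg h2]
  have e1 : (-(-(s : Int)) - 1).toNat = s - 1 := by
    have : -(-(s : Int)) - 1 = ((s - 1 : Nat) : Int) := by push_cast [hs]; ring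
    rw [this, Int.toNat_natCast]
  rw [e1, Int.toNat_natCast]

theorem pvStep (s : Nat) (hs : 0 < s) :
    ∃ s' : Nat,
      (PySem.Int.bor
        (PySem.Int.floordiv
          ((PySem.Int.bxor ((s : Int) + PySem.Int.band (s : Int) (-(s : Int))) (s : Int)) >>> 2)
          (PySem.Int.band (s : Int) (-(s : Int))))
        ((s : Int) + PySem.Int.band (s : Int) (-(s : Int)))) = (s' : Int) ∧
      s < s' ∧ pcN s' = pcN s ∧ ∀ m : Nat, s < m → m < s' → pcN m ≠ pcN s := by
  obtain ⟨a, t, z', hdec⟩ := pvDecomp s hs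
  set n := t + z' + 2 with hn
  have hpt : (1 : Nat) ≤ 2 ^ t := Nat.one_le_two_pow
  have hpz : (1 : Nat) ≤ 2 ^ (z' + 1) := Nat.one_le_two_pow
  have hpz' : (1 : Nat) ≤ 2 ^ z' := Nat.one_le_two_pow
  have hb_eq : (2 ^ (z' + 1) - 1) * 2 ^ t = 2 ^ (t + z' + 1) - 2 ^ t := by
    rw [Nat.sub_mul, one_mul]; congr 1; ring
  have hmid : 2 ^ t ≤ 2 ^ (t + z' + 1) := Nat.pow_le_pow_right (by norm_num) (by omega)
  have hmidn : 2 ^ (t + z' + 1) < 2 ^ n := by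
    rw [hn, (by ring : 2 ^ (t + z' + 2) = 2 * 2 ^ (t + z' + 1))]; omega
  have hb_lt : (2 ^ (z' + 1) - 1) * 2 ^ t < 2 ^ n := by omega
  have hn2 : 2 ^ n = 2 * 2 ^ (t + z' + 1) := by rw [hn]; ring
  have hzle : 2 ^ z' ≤ 2 ^ (t + z' + 1) := Nat.pow_le_pow_right (by norm_num) (by omega)
  have ht1 : 2 ^ (t + 1) = 2 * 2 ^ t := by ring
  have h2t : 2 ^ (t + 1) ≤ 2 ^ (t + z' + 1) := Nat.pow_le_pow_right (by norm_num) (by omega)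
  have hb_pos : 1 ≤ (2 ^ (z' + 1) - 1) * 2 ^ t := by omega
  have hland : s &&& (s - 1) = s - 2 ^ t := by
    have hsm1 : s - 1 = 2 ^ n * a + ((2 ^ (z' + 1) - 1) * 2 ^ t - 1) := by omega
    have h1 := pvBandHigh n a ((2 ^ (z' + 1) - 1) * 2 ^ t) ((2 ^ (z' + 1) - 1) * 2 ^ t - 1)
      hb_lt (by omega)
    rw [← hdec, ← hsm1] at h1
    rw [h1, pvBandBlockPred t z']
    omega
  have hc : PySem.Int.band (s : Int) (-(s : Int)) = ((2 ^ t : Nat) : Int) := by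
    rw [pvBandNegSelf s hs, hland]
    congr 1
    omega
  have hr_nat : s + 2 ^ t = 2 ^ n * a + 2 ^ (t + z' + 1) := by omega
  have hr : (s : Int) + PySem.Int.band (s : Int) (-(s : Int)) = (((2 ^ n * a + 2 ^ (t + z' + 1) : Nat)) : Int) := by
    rw [hc]
    norm_cast
  have hxor_nat : (2 ^ n * a + 2 ^ (t + z' + 1)) ^^^ s = (2 ^ (z' + 2) - 1) * 2 ^ t := by
    rw [hdec]
    rw [pvXorHigh n a (2 ^ (t + z' + 1)) ((2 ^ (z' + 1) - 1) * 2 ^ t) hmidn hb_lt]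
    rw [pvXorTwoPow (t + z' + 1) _ (by omega)]
    have e : 2 ^ (t + z' + 2) = 2 * 2 ^ (t + z' + 1) := by ring
    have e2 : (2 ^ (z' + 2) - 1) * 2 ^ t = 2 ^ (t + z' + 2) - 2 ^ t := by
      rw [Nat.sub_mul, one_mul]; congr 1; ring
    omega
  have hxor : PySem.Int.bxor ((s : Int) + PySem.Int.band (s : Int) (-(s : Int))) (s : Int)
      = (((2 ^ (z' + 2) - 1) * 2 ^ t : Nat) : Int) := by
    rw [hr, PySem.Int.bxor_natCast, hxor_nat]
  have hdiv : PySem.Int.floordiv ((((2 ^ (z' + 2) - 1) * 2 ^ t : Nat) : Int) >>> 2) (((2 ^ t : Nat) : Int))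
      = (((2 ^ z' - 1 : Nat)) : Int) := by
    have h1 : ((((2 ^ (z' + 2) - 1) * 2 ^ t : Nat) : Int) >>> 2) = ((((2 ^ (z' + 2) - 1) * 2 ^ t) >>> 2 : Nat) : Int) := rfl
    rw [h1, PySem.Int.floordiv_natCast]
    congr 1
    rw [Nat.shiftRight_eq_div_pow]
    rw [Nat.div_div_eq_div_mul]
    have e : 2 ^ 2 * 2 ^ t = 2 ^ t * 4 := by ring
    rw [e, ← Nat.div_div_eq_div_mul]
    rw [Nat.mul_div_cancel _ (Nat.two_pow_pos t)]
    have e4 : 2 ^ (z' + 2) - 1 = 4 * (2 ^ z' - 1) + 3 := by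
      have : 2 ^ (z' + 2) = 4 * 2 ^ z' := by ring
      omega
    rw [e4, Nat.mul_add_div (by norm_num)]
    norm_num
  set s' := 2 ^ n * a + 2 ^ (t + z' + 1) + (2 ^ z' - 1) with hs'
  have hbor : PySem.Int.bor (((2 ^ z' - 1 : Nat)) : Int) (((2 ^ n * a + 2 ^ (t + z' + 1) : Nat)) : Int)
      = (s' : Int) := by
    rw [PySem.Int.bor_natCast]
    congr 1
    have hrr : 2 ^ n * a + 2 ^ (t + z' + 1) = 2 ^ (t + z' + 1) * (2 * a + 1) := by
      rw [hn]; ring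
    rw [hrr, pvLorDisjoint (t + z' + 1) (2 * a + 1) (2 ^ z' - 1) (by omega)]
    rw [hs', hrr]
  have hr2 : ((s : Int) + ((2 ^ t : Nat) : Int)) = (((2 ^ n * a + 2 ^ (t + z' + 1) : Nat)) : Int) := by
    exact_mod_cast hr_nat
  refine ⟨s', ?_, ?_, ?_, ?_⟩
  · rw [hxor, hc, hr2, hdiv, hbor]
  · rw [hs', hdec]; omega
  · have hps : pcN s = pcN a + (z' + 1) := by
      rw [hdec, pcN_split n a _ hb_lt]
      have : (2 ^ (z' + 1) - 1) * 2 ^ t = 2 ^ t * (2 ^ (z' + 1) - 1) + 0 := by ring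
      rw [this, pcN_split t (2 ^ (z' + 1) - 1) 0 (Nat.two_pow_pos t), pcN_zero,
        pcN_two_pow_sub_one]
    have hps' : pcN s' = pcN a + (z' + 1) := by
      have hlow : 2 ^ (t + z' + 1) + (2 ^ z' - 1) < 2 ^ n := by
        have : 2 ^ z' ≤ 2 ^ (t + z' + 1) := Nat.pow_le_pow_right (by norm_num) (by omega)
        omega
      have e5 : s' = 2 ^ n * a + (2 ^ (t + z' + 1) + (2 ^ z' - 1)) := by rw [hs']; omega
      have e6 : 2 ^ (t + z' + 1) + (2 ^ z' - 1) = 2 ^ (t + z' + 1) * 1 + (2 ^ z' - 1) := by omega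
      have hzlt : 2 ^ z' - 1 < 2 ^ (t + z' + 1) := by
        have : 2 ^ z' ≤ 2 ^ (t + z' + 1) := Nat.pow_le_pow_right (by norm_num) (by omega)
        omega
      rw [e5, pcN_split n a _ hlow, e6, pcN_split (t + z' + 1) 1 _ hzlt, pcN_one,
        pcN_two_pow_sub_one]
      omega
    omega
  · intro m hm1 hm2 hpc
    have hps : pcN s = pcN a + (z' + 1) := by
      rw [hdec, pcN_split n a _ hb_lt]
      have : (2 ^ (z' + 1) - 1) * 2 ^ t = 2 ^ t * (2 ^ (z' + 1) - 1) + 0 := by ring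
      rw [this, pcN_split t (2 ^ (z' + 1) - 1) 0 (Nat.two_pow_pos t), pcN_zero,
        pcN_two_pow_sub_one]
    have hzlt : 2 ^ z' ≤ 2 ^ (t + z' + 1) := Nat.pow_le_pow_right (by norm_num) (by omega)
    rcases Nat.lt_or_ge m (2 ^ n * a + 2 ^ (t + z' + 1)) with hcase | hcase
    · have hu1 : 2 ^ n * a ≤ m := by
        rw [hdec] at hm1; omega
      set u := m - 2 ^ n * a with hu
      have hub : (2 ^ (z' + 1) - 1) * 2 ^ t < u := by rw [hdec] at hm1; omega
      have hub2 : u < 2 ^ (t + z' + 1) := by omega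
      have hmd : m = 2 ^ n * a + u := by omega
      have hpcm : pcN m = pcN a + pcN u := by
        rw [hmd, pcN_split n a u (by omega)]
      have hularge : ¬ pcN u ≤ z' + 1 := by
        intro hle
        have := pcN_max_val (z' + 1) t u (by rw [(by ring : t + (z' + 1) = t + z' + 1)]; exact hub2) hle
        rw [(by ring : t + (z' + 1) = t + z' + 1)] at this
        omega
      omega
    · set u := m - (2 ^ n * a + 2 ^ (t + z' + 1)) with hu
      have hub : u < 2 ^ z' - 1 := by rw [hs'] at hm2; omega
      have hmd : m = 2 ^ n * a + (2 ^ (t + z' + 1) + u) := by omega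
      have hlow : 2 ^ (t + z' + 1) + u < 2 ^ n := by omega
      have e6 : 2 ^ (t + z' + 1) + u = 2 ^ (t + z' + 1) * 1 + u := by omega
      have hpcm : pcN m = pcN a + (1 + pcN u) := by
        rw [hmd, pcN_split n a _ hlow, e6, pcN_split (t + z' + 1) 1 u (by omega), pcN_one]
      have := pcN_lt_of_lt_pred z' u hub
      omega

-- the list of selected vertices of a mask, shared spec for both ports
def pvSelN (V : Int) (s : Nat) : List Int :=
  (PySem.List.pyRange 1 (V + 1) 1).filter (fun v => s.testBit (v - 1).toNat)

-- the ascending (index+1) list of the set bits of m, read below a width w with m < 2^w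
def pvBitsW (w m : Nat) : List Int :=
  List.map (fun i : Nat => ((i : Nat) : Int) + 1) (List.filter (fun i => m.testBit i) (List.range w))

theorem pvBitsW_zero (w : Nat) : pvBitsW w 0 = [] := by
  simp [pvBitsW, Nat.zero_testBit]

theorem pvBitsW_eq_of_le (w w' m : Nat) (hww : w ≤ w') (h : m < 2 ^ w) :
    pvBitsW w' m = pvBitsW w m := by
  unfold pvBitsW
  have e : w' = w + (w' - w) := by omega
  rw [e, List.range_add, List.filter_append]
  have hnil : (List.map (fun x => w + x) (List.range (w' - w))).filter (fun i => m.testBit i) = [] := by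
    rw [List.filter_eq_nil_iff]
    intro i hi
    obtain ⟨j, _, rfl⟩ := List.mem_map.mp hi
    have : m < 2 ^ (w + j) := lt_of_lt_of_le h (Nat.pow_le_pow_right (by norm_num) (by omega))
    simp [Nat.testBit_lt_two_pow this]
  rw [hnil, List.append_nil]

theorem pvBitsW_indep (w w' m : Nat) (h : m < 2 ^ w) (h' : m < 2 ^ w') :
    pvBitsW w m = pvBitsW w' m := by
  rcases le_total w w' with hle | hle
  · rw [pvBitsW_eq_of_le w w' m hle h]
  · rw [pvBitsW_eq_of_le w' w m hle h']

theorem pvBitsW_pow_add (t x : Nat) (hx : x < 2 ^ t) :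
    pvBitsW (t + 1) (2 ^ t + x) = pvBitsW t x ++ [(t : Int) + 1] := by
  unfold pvBitsW
  rw [List.range_add, List.filter_append, List.map_append]
  have e : 2 ^ t + x = 2 ^ t * 1 + x := by omega
  have hfil : (List.range t).filter (fun i => (2 ^ t + x).testBit i)
      = (List.range t).filter (fun i => x.testBit i) := by
    apply List.filter_congr
    intro i hi
    rw [List.mem_range] at hi
    rw [e, Nat.testBit_two_pow_mul_add 1 hx i, if_pos hi]
  have hone : (List.map (fun j => t + j) (List.range 1)).filter (fun i => (2 ^ t + x).testBit i) = [t] := by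
    have : List.map (fun j => t + j) (List.range 1) = [t] := by simp
    rw [this]
    have hbit : (2 ^ t + x).testBit t = true := by
      rw [e, Nat.testBit_two_pow_mul_add 1 hx t, if_neg (by omega)]
      simpa using Nat.testBit_two_pow_self (n := 0) ▸ rfl
    simp [hbit]
  rw [hfil, hone]
  simp

theorem pvColexN_mem (r : Nat) : ∀ (n : Int) (sel : List Int),
    sel ∈ pvColexN n r ↔ ∃ m : Nat, m < 2 ^ n.toNat ∧ pcN m = r ∧ sel = pvBitsW n.toNat m := by
  induction r with
  | zero =>
    intro n sel
    simp only [pvColexN, List.mem_singleton]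
    constructor
    · rintro rfl
      exact ⟨0, Nat.two_pow_pos _, pcN_zero, (pvBitsW_zero _).symm⟩
    · rintro ⟨m, _, hpc, rfl⟩
      have : m = 0 := (pcN_eq_zero_iff m).mp hpc
      subst this
      rw [pvBitsW_zero]
  | succ r ih =>
    intro n sel
    rw [pvColexN]
    rw [List.mem_flatMap]
    constructor
    · rintro ⟨top, htop, hsel⟩
      rw [PySem.List.mem_pyRange_one] at htop
      obtain ⟨rest, hrest, rfl⟩ := List.mem_map.mp hsel
      obtain ⟨m', hm'lt, hm'pc, rfl⟩ := (ih (top - 1) rest).mp hrest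
      have ht1 : 1 ≤ top := by omega
      set t := (top - 1).toNat with htdef
      have htop_t : top = (t : Int) + 1 := by omega
      have htn : t + 1 ≤ n.toNat := by omega
      refine ⟨2 ^ t + m', ?_, ?_, ?_⟩
      · calc 2 ^ t + m' < 2 ^ (t + 1) := by have : 2 ^ (t+1) = 2 * 2^t := by ring
                                            omega
          _ ≤ 2 ^ n.toNat := Nat.pow_le_pow_right (by norm_num) htn
      · have e : 2 ^ t + m' = 2 ^ t * 1 + m' := by omega
        rw [e, pcN_split t 1 m' hm'lt, pcN_one, hm'pc]
        omega
      · rw [htop_t, ← pvBitsW_pow_add t m' hm'lt]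
        apply pvBitsW_indep
        · have : 2 ^ (t+1) = 2 * 2^t := by ring
          omega
        · calc 2 ^ t + m' < 2 ^ (t + 1) := by have : 2 ^ (t+1) = 2 * 2^t := by ring
                                              omega
            _ ≤ 2 ^ n.toNat := Nat.pow_le_pow_right (by norm_num) htn
    · rintro ⟨m, hmlt, hmpc, rfl⟩
      have hm0 : m ≠ 0 := by
        intro h; subst h; rw [pcN_zero] at hmpc; omega
      set t := m.log2 with htdef
      have hlo : 2 ^ t ≤ m := Nat.log2_self_le hm0
      have hhi : m < 2 ^ (t + 1) := Nat.lt_log2_self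
      set m' := m - 2 ^ t with hm'def
      have hm'lt : m' < 2 ^ t := by
        have : 2 ^ (t + 1) = 2 * 2 ^ t := by ring
        omega
      have hmsplit : m = 2 ^ t + m' := by omega
      have hpcsplit : pcN m = 1 + pcN m' := by
        have e : m = 2 ^ t * 1 + m' := by omega
        rw [e, pcN_split t 1 m' hm'lt, pcN_one]
      have htn : t + 1 ≤ n.toNat := by
        by_contra h
        push_neg at h
        have : 2 ^ n.toNat ≤ 2 ^ t := Nat.pow_le_pow_right (by norm_num) (by omega)
        omega
      refine ⟨(t : Int) + 1, ?_, ?_⟩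
      · rw [PySem.List.mem_pyRange_one]
        constructor
        · have hr : r + 1 ≤ t + 1 := by
            have := pcN_le_width (t + 1) m hhi
            omega
          exact_mod_cast by omega
        · have hn0 : 0 ≤ n := by
            by_contra h
            push_neg at h
            have : n.toNat = 0 := by omega
            omega
          omega
      · rw [List.mem_map]
        refine ⟨pvBitsW t m', ?_, ?_⟩
        · apply (ih ((t : Int) + 1 - 1) (pvBitsW t m')).mpr
          refine ⟨m', ?_, by omega, ?_⟩
          · have : ((t : Int) + 1 - 1).toNat = t := by omega
            rw [this]; exact hm'lt
          · have : ((t : Int) + 1 - 1).toNat = t := by omega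
            rw [this]
        · rw [hmsplit, ← pvBitsW_pow_add t m' hm'lt]
          apply pvBitsW_indep
          · rw [← hmsplit]
            exact hhi
          · rw [← hmsplit]
            exact hmlt

theorem pvSelN_eq_bitsW (V : Int) (m : Nat) (hm : m < 2 ^ V.toNat) :
    pvSelN V m = pvBitsW V.toNat m := by
  unfold pvSelN pvBitsW
  rw [PySem.List.pyRange_one 1 (V + 1)]
  have hlen : (V + 1 - 1).toNat = V.toNat := by omega
  rw [hlen, List.filter_map]
  have hfil : (List.range V.toNat).filter ((fun v : Int => m.testBit (v - 1).toNat) ∘ (fun k : Nat => (1 : Int) + (k : Int)))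
      = (List.range V.toNat).filter (fun i => m.testBit i) := by
    apply List.filter_congr
    intro k _
    simp only [Function.comp_apply]
    have e1 : ((1 : Int) + (k : Int) - 1).toNat = k := by omega
    rw [e1]
  rw [hfil]
  apply List.map_congr_left
  intro k _
  ring

-- pyGetD outside the list returns the default
theorem pvGetD_oob {α : Type} (xs : List α) (i : Int) (d : α) (h : (xs.length : Int) ≤ i) :
    PySem.List.pyGetD xs i d = d := by
  apply PySem.List.pyGetD_of_none
  unfold PySem.List.pyGet? PySem.List.pyIdx?
  split_ifs with h1 h2 <;> simp_all <;> omega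

-- Pre_'s two zero-block clauses imply: every read entry gr[v][i] with an endpoint > 24 is 0
theorem pvZ_of_pre (V : Int) (gr : List (List Int))
    (ha : ∀ row ∈ (gr.drop 25).take (V.toNat - 24), ∀ x ∈ (row.drop 1).take V.toNat, x = 0)
    (hb : ∀ row ∈ (gr.drop 1).take (min V.toNat 24), ∀ x ∈ (row.drop 25).take (V.toNat - 24), x = 0)
    (v i : Int) (hv1 : 1 ≤ v) (hv2 : v ≤ V) (hi1 : 1 ≤ i) (hi2 : i ≤ V)
    (h24 : 24 < v ∨ 24 < i) : pvAt2 gr v i = 0 := by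
  unfold pvAt2
  by_cases hvr : v < (gr.length : Int)
  · rw [PySem.List.pyGetD_eq_getElem gr [] (by omega) hvr]
    set row := gr[v.toNat]'(by omega) with hrowdef
    by_cases hir : i < ((row.length : Nat) : Int)
    · rw [PySem.List.pyGetD_eq_getElem row 0 (by omega) hir]
      rcases Classical.em (24 < v) with hv24 | hv24
      · -- row index > 24: clause (a)
        have hidx : v.toNat - 25 < ((gr.drop 25).take (V.toNat - 24)).length := by
          simp only [List.length_take, List.length_drop]
          omega
        have heq : ((gr.drop 25).take (V.toNat - 24))[v.toNat - 25]'hidx = row := by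
          rw [List.getElem_take, List.getElem_drop]
          rw [hrowdef]
          congr 1
          omega
        have hrowmem : row ∈ (gr.drop 25).take (V.toNat - 24) := heq ▸ List.getElem_mem hidx
        have hxidx : i.toNat - 1 < ((row.drop 1).take V.toNat).length := by
          simp only [List.length_take, List.length_drop]
          omega
        have hxeq : ((row.drop 1).take V.toNat)[i.toNat - 1]'hxidx = row[i.toNat]'(by omega) := by
          rw [List.getElem_take, List.getElem_drop]
          congr 1
          omega
        exact hxeq ▸ ha row hrowmem _ (List.getElem_mem hxidx)
      · -- column index > 24, row ≤ 24: clause (b)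
        have hi24 : 24 < i := by omega
        have hidx : v.toNat - 1 < ((gr.drop 1).take (min V.toNat 24)).length := by
          simp only [List.length_take, List.length_drop]
          omega
        have heq : ((gr.drop 1).take (min V.toNat 24))[v.toNat - 1]'hidx = row := by
          rw [List.getElem_take, List.getElem_drop]
          rw [hrowdef]
          congr 1
          omega
        have hrowmem : row ∈ (gr.drop 1).take (min V.toNat 24) := heq ▸ List.getElem_mem hidx
        have hxidx : i.toNat - 25 < ((row.drop 25).take (V.toNat - 24)).length := by
          simp only [List.length_take, List.length_drop]
          omega
        have hxeq : ((row.drop 25).take (V.toNat - 24))[i.toNat - 25]'hxidx = row[i.toNat]'(by omega) := by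
          rw [List.getElem_take, List.getElem_drop]
          congr 1
          omega
        exact hxeq ▸ hb row hrowmem _ (List.getElem_mem hxidx)
    · rw [pvGetD_oob row i 0 (by omega)]
  · rw [pvGetD_oob gr v [] (by omega)]
    rw [pvGetD_oob ([] : List Int) i 0 (by simp; omega)]

-- relation between A's (vis, cnt) state and B's covered set
def pvInv (st : List (List Int) × Int) (P : List (Int × Int)) : Prop :=
  st.2 = (P.length : Int) ∧ st.1.length = 25 ∧ (∀ r ∈ st.1, r.length = 25) ∧
  (∀ x y : Int, 1 ≤ x → x ≤ 24 → 1 ≤ y → y ≤ 24 →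
    pvAt2 st.1 x y = (if (min x y, max x y) ∈ P then 1 else 0))

theorem pvVisSet_shape (m : List (List Int)) (v i : Int) (hv : 0 ≤ v) (hv2 : v ≤ 24)
    (hi : 0 ≤ i) (h1 : m.length = 25) (h2 : ∀ r ∈ m, r.length = 25) :
    (pvA_visSet m v i).length = 25 ∧ ∀ r ∈ pvA_visSet m v i, r.length = 25 := by
  unfold pvA_visSet
  rw [PySem.List.pySetD_of_nonneg m _ hv]
  refine ⟨by rw [List.length_set, h1], ?_⟩
  intro r hr
  rcases List.mem_or_eq_of_mem_set hr with h | h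
  · exact h2 r h
  · subst h
    have hin : v < (m.length : Int) := by omega
    rw [PySem.List.pyGetD_eq_getElem m [] hv hin, PySem.List.pySetD_of_nonneg _ _ hi,
      List.length_set]
    exact h2 _ (List.getElem_mem _)

theorem pvVisSet_at (m : List (List Int)) (v i x y : Int)
    (h1 : m.length = 25) (h2 : ∀ r ∈ m, r.length = 25)
    (hv : 0 ≤ v) (hv2 : v ≤ 24) (hi : 0 ≤ i) (hi2 : i ≤ 24)
    (hx : 0 ≤ x) (hx2 : x ≤ 24) (hy : 0 ≤ y) (hy2 : y ≤ 24) :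
    pvAt2 (pvA_visSet m v i) x y = if x = v ∧ y = i then 1 else pvAt2 m x y := by
  have hvm : v < (m.length : Int) := by omega
  have hxm : x.toNat < m.length := by omega
  have hrowv : (m[v.toNat]'(by omega)).length = 25 := h2 _ (List.getElem_mem _)
  have hrowx : (m[x.toNat]'hxm).length = 25 := h2 _ (List.getElem_mem _)
  have hRHS : PySem.List.pyGetD (PySem.List.pyGetD m x []) y 0 = (m[x.toNat]'hxm)[y.toNat]'(by omega) := by
    rw [PySem.List.pyGetD_eq_getElem m [] hx (by omega),
      PySem.List.pyGetD_eq_getElem _ 0 hy (by rw [hrowx]; omega)]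
  unfold pvA_visSet pvAt2
  rw [PySem.List.pyGetD_eq_getElem m [] hv hvm, PySem.List.pySetD_of_nonneg _ _ hi,
    PySem.List.pySetD_of_nonneg m _ hv]
  have hxs : x < ((m.set v.toNat ((m[v.toNat]'(by omega)).set i.toNat 1)).length : Int) := by
    rw [List.length_set]; omega
  rw [PySem.List.pyGetD_eq_getElem _ [] hx hxs]
  rw [List.getElem_set]
  by_cases hxv : v.toNat = x.toNat
  · simp only [if_pos hxv]
    have hyset : y < ((((m[v.toNat]'(by omega)).set i.toNat 1)).length : Int) := by
      rw [List.length_set, hrowv]; omega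
    rw [PySem.List.pyGetD_eq_getElem _ 0 hy hyset, List.getElem_set]
    by_cases hyi : i.toNat = y.toNat
    · have : x = v ∧ y = i := by omega
      simp [this, hyi]
    · have hne : ¬ (x = v ∧ y = i) := by omega
      simp only [if_neg hyi, if_neg hne, hRHS, hxv]
  · have hne : ¬ (x = v ∧ y = i) := by omega
    simp only [if_neg hxv, if_neg hne]
    rw [hRHS, PySem.List.pyGetD_eq_getElem (m[x.toNat]'hxm) 0 hy (by rw [hrowx]; omega)]

theorem pvFoldRel {β : Type} (Inv : (List (List Int) × Int) → List (Int × Int) → Prop)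
    (l : List β) (f : (List (List Int) × Int) → β → (List (List Int) × Int))
    (g : List (Int × Int) → β → List (Int × Int)) :
    ∀ st P, Inv st P → (∀ x ∈ l, ∀ st P, Inv st P → Inv (f st x) (g P x)) →
      Inv (l.foldl f st) (l.foldl g P) := by
  induction l with
  | nil => intro st P h _; exact h
  | cons a l ih =>
    intro st P h hstep
    simp only [List.foldl_cons]
    exact ih _ _ (hstep a (by simp) st P h) (fun x hx => hstep x (by simp [hx]))

set_option maxHeartbeats 1000000 in
theorem pvStepRel (V : Int) (gr : List (List Int)) (v i : Int)
    (hv1 : 1 ≤ v) (hv2 : v ≤ V) (hi1 : 1 ≤ i) (hi2 : i ≤ V)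
    (hz : (24 < v ∨ 24 < i) → pvAt2 gr v i = 0)
    (st : List (List Int) × Int) (P : List (Int × Int)) (h : pvInv st P) :
    pvInv
      (if pvAt2 gr v i ≠ 0 ∧ pvAt2 st.1 v i = 0 then
        (pvA_visSet (pvA_visSet st.1 v i) i v, st.2 + 1)
      else st)
      (if pvAt2 gr v i ≠ 0 then PySem.Set.add P (min v i, max v i) else P) := by
  obtain ⟨hcnt, hlen, hrows, hvis⟩ := h
  by_cases hgr : pvAt2 gr v i ≠ 0
  · have hb24 : v ≤ 24 ∧ i ≤ 24 := by
      by_contra hc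
      exact hgr (hz (by omega))
    obtain ⟨hv24, hi24⟩ := hb24
    have hgr' : pvAt2 gr v i ≠ 0 := hgr
    simp only [if_pos hgr]
    have hvisvi := hvis v i (by omega) (by omega) (by omega) (by omega)
    by_cases hmem : (min v i, max v i) ∈ P
    · have hval : pvAt2 st.1 v i = 1 := by rw [hvisvi, if_pos hmem]
      have hcond : ¬ (pvAt2 gr v i ≠ 0 ∧ pvAt2 st.1 v i = 0) := by
        rw [hval]; simp
      rw [if_neg hcond, PySem.Set.add_of_mem hmem]
      exact ⟨hcnt, hlen, hrows, hvis⟩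
    · have hval : pvAt2 st.1 v i = 0 := by rw [hvisvi, if_neg hmem]
      have hcond : pvAt2 gr v i ≠ 0 ∧ pvAt2 st.1 v i = 0 := ⟨hgr', hval⟩
      rw [if_pos hcond, PySem.Set.add_of_not_mem hmem]
      have hsh1 := pvVisSet_shape st.1 v i (by omega) (by omega) (by omega) hlen hrows
      have hsh2 := pvVisSet_shape _ i v (by omega) (by omega) (by omega) hsh1.1 hsh1.2
      refine ⟨?_, hsh2.1, hsh2.2, ?_⟩
      · simp only [List.length_append, List.length_cons, List.length_nil]
        push_cast
        omega
      · intro x y hx1 hx2 hy1 hy2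
        rw [pvVisSet_at _ i v x y hsh1.1 hsh1.2 (by omega) (by omega) (by omega) (by omega)
            (by omega) (by omega) (by omega) (by omega),
          pvVisSet_at st.1 v i x y hlen hrows (by omega) (by omega) (by omega) (by omega)
            (by omega) (by omega) (by omega) (by omega)]
        simp only [hvis x y hx1 hx2 hy1 hy2]
        have hpair : ((min x y, max x y) = (min v i, max v i)) ↔ ((x = v ∧ y = i) ∨ (x = i ∧ y = v)) := by
          rw [Prod.mk.injEq]; omega
        by_cases hxy : (x = i ∧ y = v)
        · have he : (min x y, max x y) = (min v i, max v i) := by rw [hpair]; tauto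
          have : (min x y, max x y) ∈ P ++ [(min v i, max v i)] := by simp [he]
          rw [if_pos this, if_pos hxy]
        · by_cases hxy2 : (x = v ∧ y = i)
          · have he : (min x y, max x y) = (min v i, max v i) := by rw [hpair]; tauto
            have : (min x y, max x y) ∈ P ++ [(min v i, max v i)] := by simp [he]
            rw [if_neg hxy, if_pos hxy2, if_pos this]
          · have hne : (min x y, max x y) ≠ (min v i, max v i) := by
              simp only [ne_eq, hpair]; tauto
            have hmm : ((min x y, max x y) ∈ P ++ [(min v i, max v i)]) ↔ ((min x y, max x y) ∈ P) := by
              simp [hne]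
            rw [if_neg hxy, if_neg hxy2]
            simp only [hmm]
  · have hcond : ¬ (pvAt2 gr v i ≠ 0 ∧ pvAt2 st.1 v i = 0) := by tauto
    rw [if_neg hcond, if_neg hgr]
    exact ⟨hcnt, hlen, hrows, hvis⟩

-- A's doubling-j loop is the fold of the inner loop over the selected vertices
theorem pvJFold (V : Int) (gr : List (List Int)) (s : Nat) (N : Nat) :
    ∀ st0 : List (List Int) × Int,
      ((PySem.List.pyRange 1 ((N : Int) + 1) 1).foldl
        (fun (st : Int × (List (List Int) × Int)) v =>
          if PySem.Int.band ((s : Nat) : Int) st.1 ≠ 0 then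
            (st.1 <<< 1, pvA_innerFor V gr v st.2)
          else
            (st.1 <<< 1, st.2))
        (1, st0))
      = (((2 ^ N : Nat) : Int),
         (((PySem.List.pyRange 1 ((N : Int) + 1) 1).filter
            (fun v => s.testBit (v - 1).toNat)).foldl (fun st v => pvA_innerFor V gr v st) st0)) := by
  induction N with
  | zero =>
    intro st0
    rw [PySem.List.pyRange_one_eq_nil (by omega)]
    simp
  | succ N ih =>
    intro st0
    have hsplit : PySem.List.pyRange 1 (((N + 1 : Nat) : Int) + 1) 1
        = PySem.List.pyRange 1 ((N : Int) + 1) 1 ++ [(N : Int) + 1] := by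
      push_cast
      exact_mod_cast PySem.List.pyRange_one_succ_right (a := 1) (b := (N : Int) + 1) (by omega)
    rw [hsplit, List.foldl_append, List.filter_append, ih st0, List.foldl_append]
    have hband : PySem.Int.band ((s : Nat) : Int) ((2 ^ N : Nat) : Int) = (((s &&& 2 ^ N : Nat)) : Int) :=
      PySem.Int.band_natCast s (2 ^ N)
    have hbit : (PySem.Int.band ((s : Nat) : Int) ((2 ^ N : Nat) : Int) ≠ 0) ↔ s.testBit N = true := by
      rw [hband, Nat.and_two_pow]
      have hp : (2 : Nat) ^ N ≠ 0 := (Nat.two_pow_pos N).ne'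
      rcases Bool.eq_false_or_eq_true (s.testBit N) with h | h <;> simp [h, hp]
    have hshift : (((2 ^ N : Nat) : Int) <<< (1 : Int)) = (((2 ^ (N + 1) : Nat)) : Int) := by
      have h0 : ((2 ^ N : Nat) : Int) <<< (1 : Int) = (((2 ^ N <<< 1 : Nat)) : Int) := rfl
      rw [h0]
      congr 1
      rw [Nat.shiftLeft_eq]
      ring
    have hfilt : List.filter (fun v => s.testBit (v - 1).toNat) [(N : Int) + 1]
        = if s.testBit N = true then [(N : Int) + 1] else [] := by
      have : (((N : Int) + 1 - 1)).toNat = N := by omega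
      simp only [List.filter, this]
      rcases Bool.eq_false_or_eq_true (s.testBit N) with h | h <;> simp [h]
    by_cases hb : s.testBit N = true
    · rw [hfilt, if_pos hb]
      simp only [List.foldl_cons, List.foldl_nil]
      have hcond : PySem.Int.band ((s : Nat) : Int) ((2 ^ N : Nat) : Int) ≠ 0 := hbit.mpr hb
      simp only [List.foldl_cons, List.foldl_nil, if_pos hcond, hshift]
    · rw [hfilt, if_neg hb]
      simp only [List.foldl_cons, List.foldl_nil]
      have hcond : ¬ PySem.Int.band ((s : Nat) : Int) ((2 ^ N : Nat) : Int) ≠ 0 := by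
        intro hc; exact hb (hbit.mp hc)
      simp only [if_neg hcond, hshift]

theorem pvInvInit : pvInv (List.replicate 25 (List.replicate 25 (0 : Int)), (0 : Int)) [] := by
  refine ⟨by simp, by simp, ?_, ?_⟩
  · intro r hr
    rw [List.eq_of_mem_replicate hr]
    simp
  · intro x y hx1 hx2 hy1 hy2
    unfold pvAt2
    rw [PySem.List.pyGetD_eq_getElem _ [] (by omega) (by simp; omega),
      List.getElem_replicate,
      PySem.List.pyGetD_eq_getElem _ 0 (by omega) (by simp; omega),
      List.getElem_replicate]
    simp

theorem pvCountBridge (V : Int) (gr : List (List Int))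
    (hZ : ∀ v i : Int, 1 ≤ v → v ≤ V → 1 ≤ i → i ≤ V → (24 < v ∨ 24 < i) → pvAt2 gr v i = 0)
    (s : Nat) :
    pvA_countCovered V gr ((s : Nat) : Int)
      = PySem.Set.len (pvB_covered V gr (pvSelN V s)) := by
  unfold pvA_countCovered pvB_covered pvSelN
  have hV : V + 1 = ((V.toNat : Nat) : Int) + 1 ∨ V + 1 ≤ 1 := by omega
  rcases hV with hV | hV
  · rw [hV, pvJFold V gr s V.toNat]
    have hmain := pvFoldRel pvInv
      ((PySem.List.pyRange 1 ((V.toNat : Int) + 1) 1).filter (fun v => s.testBit (v - 1).toNat))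
      (fun st v => pvA_innerFor V gr v st)
      (fun cov v =>
        (PySem.List.pyRange 1 ((V.toNat : Int) + 1) 1).foldl
          (fun cov i => if pvAt2 gr v i ≠ 0 then PySem.Set.add cov (min v i, max v i) else cov)
          cov)
      (List.replicate 25 (List.replicate 25 (0 : Int)), (0 : Int)) PySem.Set.empty
      pvInvInit ?_
    · exact hmain.1
    · intro v hv st P hinv
      have hv' : 1 ≤ v ∧ v ≤ V := by
        have hm := List.mem_of_mem_filter hv
        rw [PySem.List.mem_pyRange_one] at hm
        omega
      unfold pvA_innerFor
      rw [hV]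
      exact pvFoldRel pvInv (PySem.List.pyRange 1 ((V.toNat : Int) + 1) 1) _ _ st P hinv
        (fun i hi st' P' hinv' => by
          rw [PySem.List.mem_pyRange_one] at hi
          exact pvStepRel V gr v i hv'.1 hv'.2 (by omega) (by omega)
            (fun h24 => hZ v i hv'.1 hv'.2 (by omega) (by omega) h24) st' P' hinv')
  · rw [PySem.List.pyRange_one_eq_nil hV]
    simp [pvInvInit.1]

-- the empty subset covers nothing, on A's side (no hZ needed)
theorem pvCount0 (V : Int) (gr : List (List Int)) :
    pvA_countCovered V gr ((0 : Nat) : Int) = 0 := by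
  unfold pvA_countCovered
  by_cases hV : 0 ≤ V
  · have hV' : V + 1 = ((V.toNat : Nat) : Int) + 1 := by omega
    rw [hV', pvJFold V gr 0 V.toNat]
    simp [Nat.zero_testBit]
  · rw [PySem.List.pyRange_one_eq_nil (by omega)]
    simp

theorem pvAGosperIff (V E : Int) (gr : List (List Int)) (L : Nat) :
    ∀ (fuel : Nat) (s : Nat), 0 < s → L ≤ fuel + s →
      (pvA_gosper V E gr ((L : Nat) : Int) fuel ((s : Nat) : Int) = true ↔
        ∃ m : Nat, s ≤ m ∧ m < L ∧ pcN m = pcN s ∧ pvA_countCovered V gr ((m : Nat) : Int) = E) := by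
  intro fuel
  induction fuel with
  | zero =>
    intro s hs hfuel
    simp only [pvA_gosper, Bool.false_eq_true, false_iff]
    rintro ⟨m, h1, h2, _⟩
    omega
  | succ fuel ih =>
    intro s hs hfuel
    simp only [pvA_gosper]
    by_cases hL : ((s : Nat) : Int) < ((L : Nat) : Int)
    · have hLs : s < L := by exact_mod_cast hL
      rw [if_pos hL]
      by_cases hchk : pvA_countCovered V gr ((s : Nat) : Int) = E
      · rw [if_pos hchk]
        simp only [true_iff]
        exact ⟨s, le_refl s, hLs, rfl, hchk⟩
      · rw [if_neg hchk]
        obtain ⟨s', hstep, hlt, hpc, hmin⟩ := pvStep s hs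
        rw [hstep]
        rw [ih s' (by omega) (by omega)]
        constructor
        · rintro ⟨m, h1, h2, h3, h4⟩
          exact ⟨m, by omega, h2, by rw [h3, hpc], h4⟩
        · rintro ⟨m, h1, h2, h3, h4⟩
          have hms : m ≠ s := by
            rintro rfl; exact hchk h4
          have hge : s' ≤ m := by
            by_contra hgt
            exact hmin m (by omega) (by omega) h3
          exact ⟨m, hge, h2, by rw [h3, ← hpc], h4⟩
    · rw [if_neg hL]
      simp only [Bool.false_eq_true, false_iff]
      rintro ⟨m, h1, h2, _⟩
      have : ¬ s < L := fun h => hL (by exact_mod_cast h)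
      omega

-- ===== VERDICT (by name: the statement is the Claim_ definition above) =====
theorem isCover_spec : Claim_equal_isCover := by
  intro V k E gr vc _hdom hpre
  obtain ⟨hV0, hk0, hkE, hmain⟩ := hpre
  unfold Spec_isCover
  rw [Bool.eq_iff_iff]
  unfold isCover
  have hsl : ((1 : Int) <<< V.toNat) = (((2 ^ V.toNat : Nat)) : Int) := by
    have h0 : (1 : Int) <<< V.toNat = (((1 <<< V.toNat : Nat)) : Int) := rfl
    rw [h0, Nat.one_shiftLeft]
  rw [hsl, Int.toNat_natCast]
  have hLpos : 0 < 2 ^ V.toNat := Nat.two_pow_pos _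
  by_cases hk : k = 0
  · -- k = 0 (hence E = 0 under Pre_): both sides are true on the empty subset
    subst hk
    have hE : E = 0 := hkE rfl
    subst hE
    have hchk0 : pvA_countCovered V gr ((0 : Nat) : Int) = (0 : Int) := pvCount0 V gr
    constructor
    · intro _
      unfold isCover_alt
      simp [pvColexN, pvB_covered, PySem.Set.empty, PySem.Set.len]
    · intro _
      have hset : ((1 : Int) <<< (0 : Int).toNat) - 1 = ((0 : Nat) : Int) := by decide
      rw [hset]
      simp only [pvA_gosper]
      rw [if_pos (by exact_mod_cast hLpos : ((0 : Nat) : Int) < (((2 ^ V.toNat : Nat)) : Int))]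
      rw [if_pos hchk0]
  · -- k ≥ 1
    have hk1 : 1 ≤ k := by omega
    have hK1 : 1 ≤ k.toNat := by omega
    have hKp : 2 ≤ 2 ^ k.toNat := by
      calc (2 : Nat) = 2 ^ 1 := by norm_num
      _ ≤ 2 ^ k.toNat := Nat.pow_le_pow_right (by norm_num) hK1
    have hset : ((1 : Int) <<< k.toNat) - 1 = (((2 ^ k.toNat - 1 : Nat)) : Int) := by
      have h0 : (1 : Int) <<< k.toNat = (((1 <<< k.toNat : Nat)) : Int) := rfl
      rw [h0, Nat.one_shiftLeft]
      push_cast [show 1 ≤ 2 ^ k.toNat by omega]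
      ring
    rw [hset]
    rw [pvAGosperIff V E gr (2 ^ V.toNat) (2 ^ V.toNat + 1) (2 ^ k.toNat - 1) (by omega) (by omega)]
    have hB : isCover_alt V k E gr vc = true ↔
        ∃ m : Nat, m < 2 ^ V.toNat ∧ pcN m = k.toNat ∧
          PySem.Set.len (pvB_covered V gr (pvBitsW V.toNat m)) = E := by
      unfold isCover_alt
      rw [List.any_eq_true]
      constructor
      · rintro ⟨sel, hmem, hp⟩
        obtain ⟨m, h1, h2, rfl⟩ := (pvColexN_mem k.toNat V sel).mp hmem
        exact ⟨m, h1, h2, by simpa using hp⟩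
      · rintro ⟨m, h1, h2, h3⟩
        exact ⟨pvBitsW V.toNat m, (pvColexN_mem k.toNat V _).mpr ⟨m, h1, h2, rfl⟩, by simpa using h3⟩
    rw [hB]
    by_cases hkV : k ≤ V
    · obtain ⟨hlen, hrows, hza, hzb⟩ := hmain hk1 hkV
      have hZ : ∀ v i : Int, 1 ≤ v → v ≤ V → 1 ≤ i → i ≤ V → (24 < v ∨ 24 < i) → pvAt2 gr v i = 0 :=
        fun v i hv1 hv2 hi1 hi2 h24 => pvZ_of_pre V gr hza hzb v i hv1 hv2 hi1 hi2 h24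
      constructor
      · rintro ⟨m, h1, h2, h3, h4⟩
        rw [pcN_two_pow_sub_one] at h3
        refine ⟨m, h2, h3, ?_⟩
        rw [← pvSelN_eq_bitsW V m h2, ← pvCountBridge V gr hZ m]
        exact h4
      · rintro ⟨m, h1, h2, h3⟩
        refine ⟨m, ?_, h1, ?_, ?_⟩
        · by_contra h
          push_neg at h
          have := pcN_lt_of_lt_pred k.toNat m (by omega)
          omega
        · rw [h2, pcN_two_pow_sub_one]
        · rw [pvCountBridge V gr hZ m, pvSelN_eq_bitsW V m h1]
          exact h3
    · -- k > V: both sides are false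
      have hVk : V < k := by omega
      constructor
      · rintro ⟨m, h1, h2, _⟩
        clear hsl hset hB
        have hkk : V.toNat + 1 ≤ k.toNat := by omega
        have h2k : 2 ^ (V.toNat + 1) ≤ 2 ^ k.toNat := Nat.pow_le_pow_right (by norm_num) hkk
        have hdd : 2 ^ (V.toNat + 1) = 2 * 2 ^ V.toNat := by ring
        exfalso
        omega
      · rintro ⟨m, h1, h2, _⟩
        clear hsl hset hB
        have := pcN_le_width V.toNat m h1
        exfalso
        omega
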